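-- pv_equiv track=rewrite | github.com/gyumin4726/Team-3---AI-Career-Path | src/model1/evaluate_model.py | detect_fault_onset
-- ===== SOURCE A (Python) =====
-- def detect_fault_onset(predictions, true_label, threshold=5):
--     """
--     Fault 시작 시점 탐지
--
--     Args:
--         predictions: 윈도우별 예측값 리스트
--         true_label: 실제 fault 라벨
--         threshold: 연속된 fault 예측 횟수 임계값
--
--     Returns:
--         onset_idx: Fault 시작 시점 (윈도우 인덱스)
--         is_stable: Fault 예측이 안정적인지 여부
--         correct_predictions: 시작 시점부터의 연속된 정답 예측값들
--     """
--     if len(predictions) < threshold: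
--         return 0, False, []
--
--     # 연속된 정답 예측 카운트
--     correct_count = 0
--     onset_idx = 0
--
--     for i, pred in enumerate(predictions):
--         if pred == true_label and true_label != 0:  # 정상(0)이 아닌 정답 fault와 일치
--             correct_count += 1
--             if correct_count == 1:  # 첫 정답 시점 저장
--                 onset_idx = i
--         else:
--             correct_count = 0
--             onset_idx = 0
--
--         if correct_count >= threshold:
--             # 시작 시점부터 threshold 개수만큼의 예측값 반환
--             correct_predictions = predictions[onset_idx:onset_idx+threshold]
--             return onset_idx, True, correct_predictions
--
--     return 0, False, []
-- ===== SOURCE B (Python) =====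
-- def detect_fault_onset(predictions, true_label, threshold=5):
--     n = len(predictions)
--     for i in range(n - threshold + 1):
--         if true_label != 0:
--             ok = True
--             for j in range(threshold):
--                 if predictions[i + j] != true_label:
--                     ok = False
--                     break
--             if ok:
--                 return i, True, predictions[i:i + threshold]
--     return 0, False, []
-- ===== Notes on version B (the rewrite author's own statement) =====
-- stated objective: alternative
-- what changed: Replaces the single-pass running counter of consecutive correct predictions with an explicit scan over window start indices that checks each length-threshold window element by element (nested loops) and returns the first fully matching window.
-- intended difference: For threshold <= 0 (a degenerate input), A reports (0, True, predictions[0:threshold]) for any non-empty predictions even when true_label is 0, and (0, False, []) for empty predictions even when true_label is nonzero; B reports a stable onset exactly when true_label != 0 (a zero-width run is vacuously present), which is the intended reading that a fault onset requires a nonzero fault label; D_ is the xor region where the two disagree. — e.g. on detect_fault_onset([1], 0, 0): A returns (0, true, []), B returns (0, false, [])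
import Mathlib
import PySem

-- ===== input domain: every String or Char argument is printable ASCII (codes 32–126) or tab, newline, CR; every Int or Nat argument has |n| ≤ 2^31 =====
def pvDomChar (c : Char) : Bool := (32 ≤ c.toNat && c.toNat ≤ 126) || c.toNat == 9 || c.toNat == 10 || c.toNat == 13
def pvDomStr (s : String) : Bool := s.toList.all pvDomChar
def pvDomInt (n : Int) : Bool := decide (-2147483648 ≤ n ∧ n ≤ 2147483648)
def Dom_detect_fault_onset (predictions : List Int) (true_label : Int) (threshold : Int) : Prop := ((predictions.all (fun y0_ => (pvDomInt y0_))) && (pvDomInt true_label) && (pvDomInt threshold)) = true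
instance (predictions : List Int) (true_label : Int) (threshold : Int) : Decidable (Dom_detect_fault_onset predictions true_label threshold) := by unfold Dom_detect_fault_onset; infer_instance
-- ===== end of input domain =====

-- B replaces A's running counter of consecutive correct predictions with an explicit
-- first-matching-window scan (nested loops over window starts and offsets); same cost class,
-- genuinely different traversal. For threshold <= 0 the two differ on the D_ region stated below.


-- ===== PORT A =====
-- the for-loop of A: carries the running state (i, correct_count, onset_idx)
def pvALoop (predictions : List Int) (true_label : Int) (threshold : Int) :
    List Int → Int → Int → Int → Int × Bool × List Int
  | [], _, _, _ => (0, false, [])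
  | p :: rest, i, cc, onset =>
    -- if pred == true_label and true_label != 0: cc += 1; if cc == 1: onset = i
    -- else: cc = 0; onset = 0; then: if cc >= threshold: return the window
    if p = true_label ∧ true_label ≠ 0 then
      if threshold ≤ cc + 1 then
        ((if cc + 1 = 1 then i else onset), true,
          PySem.List.slice predictions (some (if cc + 1 = 1 then i else onset))
            (some ((if cc + 1 = 1 then i else onset) + threshold)))
      else
        pvALoop predictions true_label threshold rest (i + 1) (cc + 1)
          (if cc + 1 = 1 then i else onset)
    else
      if threshold ≤ (0 : Int) then
        (0, true, PySem.List.slice predictions (some 0) (some (0 + threshold)))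
      else
        pvALoop predictions true_label threshold rest (i + 1) 0 0

def detect_fault_onset (predictions : List Int) (true_label : Int) (threshold : Int) : Int × Bool × List Int :=
  if (predictions.length : Int) < threshold then (0, false, [])
  else pvALoop predictions true_label threshold predictions 0 0 0

-- ===== PORT B =====
-- inner loop of B over j in range(threshold); PySem.List.pyGet? = predictions[i+j]
-- (a none = IndexError is unreachable: every j used lies inside the list; none counts as a failed window)
def pvBWindowOk (predictions : List Int) (true_label : Int) (i : Int) : List Int → Bool
  | [] => true
  | j :: js =>
    if PySem.List.pyGet? predictions (i + j) = some true_label then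
      pvBWindowOk predictions true_label i js
    else false

-- outer loop of B over the window start indices i
def pvBScan (predictions : List Int) (true_label : Int) (threshold : Int) :
    List Int → Int × Bool × List Int
  | [] => (0, false, [])
  | i :: is =>
    if true_label ≠ 0 then
      if pvBWindowOk predictions true_label i (PySem.List.pyRange 0 threshold 1) then
        (i, true, PySem.List.slice predictions (some i) (some (i + threshold)))
      else pvBScan predictions true_label threshold is
    else pvBScan predictions true_label threshold is

def detect_fault_onset_alt (predictions : List Int) (true_label : Int) (threshold : Int) : Int × Bool × List Int :=
  pvBScan predictions true_label threshold
    (PySem.List.pyRange 0 ((predictions.length : Int) - threshold + 1) 1)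

-- ===== PRECONDITION & SPEC =====
-- For threshold <= 0 (degenerate), A reports (0, True, predictions[0:threshold]) for any non-empty
-- predictions even when true_label is 0, and (0, False, []) for empty predictions even when
-- true_label != 0; B reports a stable onset exactly when true_label != 0 (a zero-width run is
-- vacuously present), the intended reading that an onset requires a nonzero fault label.
def D_detect_fault_onset (predictions : List Int) (true_label : Int) (threshold : Int) : Prop :=
  threshold ≤ 0 ∧ (predictions = [] ↔ true_label ≠ 0)
instance (predictions : List Int) (true_label : Int) (threshold : Int) : Decidable (D_detect_fault_onset predictions true_label threshold) := by unfold D_detect_fault_onset; infer_instance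

def Spec_detect_fault_onset (predictions : List Int) (true_label : Int) (threshold : Int) (out : Int × Bool × List Int) : Prop := ¬ D_detect_fault_onset predictions true_label threshold → out = detect_fault_onset_alt predictions true_label threshold
instance (predictions : List Int) (true_label : Int) (threshold : Int) (out : Int × Bool × List Int) : Decidable (Spec_detect_fault_onset predictions true_label threshold out) := by unfold Spec_detect_fault_onset; infer_instance

def pvDiffWitness_detect_fault_onset : List Int × Int × Int := ([1], 0, 0)
def pvDiffWitnessOut_detect_fault_onset : (Int × Bool × List Int) × (Int × Bool × List Int) :=
  ((0, true, []), (0, false, []))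

-- ===== CLAIM (what is proved, stated in full; the proofs are below) =====
def Claim_unchanged_detect_fault_onset : Prop := ∀ (predictions : List Int) (true_label : Int) (threshold : Int), Dom_detect_fault_onset predictions true_label threshold → Spec_detect_fault_onset predictions true_label threshold (detect_fault_onset predictions true_label threshold)
def Claim_changed_detect_fault_onset : Prop := Dom_detect_fault_onset (pvDiffWitness_detect_fault_onset.1) (pvDiffWitness_detect_fault_onset.2.1) (pvDiffWitness_detect_fault_onset.2.2) ∧ D_detect_fault_onset (pvDiffWitness_detect_fault_onset.1) (pvDiffWitness_detect_fault_onset.2.1) (pvDiffWitness_detect_fault_onset.2.2) ∧ detect_fault_onset (pvDiffWitness_detect_fault_onset.1) (pvDiffWitness_detect_fault_onset.2.1) (pvDiffWitness_detect_fault_onset.2.2) = pvDiffWitnessOut_detect_fault_onset.1 ∧ detect_fault_onset_alt (pvDiffWitness_detect_fault_onset.1) (pvDiffWitness_detect_fault_onset.2.1) (pvDiffWitness_detect_fault_onset.2.2) = pvDiffWitnessOut_detect_fault_onset.2 ∧ pvDiffWitnessOut_detect_fault_onset.1 ≠ pvDiffWitnessOut_detect_fault_onset.2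
def Claim_exact_detect_fault_onset : Prop := ∀ (predictions : List Int) (true_label : Int) (threshold : Int), Dom_detect_fault_onset predictions true_label threshold → D_detect_fault_onset predictions true_label threshold → detect_fault_onset predictions true_label threshold ≠ detect_fault_onset_alt predictions true_label threshold

-- ===== LEMMAS AND PROOFS =====

-- the inner window loop succeeds iff every probed position holds true_label
lemma pvBWindowOk_iff (preds : List Int) (tl s : Int) (js : List Int) :
    pvBWindowOk preds tl s js = true ↔
      ∀ j ∈ js, PySem.List.pyGet? preds (s + j) = some tl := by
  induction js with
  | nil => simp [pvBWindowOk]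
  | cons j js ih =>
    simp only [pvBWindowOk]
    split_ifs with h
    · simp [ih, h]
    · simp [h]

-- a window that probes a position not holding true_label fails
lemma pvBWindowOk_false (preds : List Int) (tl s th j : Int) (hj0 : 0 ≤ j) (hjth : j < th)
    (h : PySem.List.pyGet? preds (s + j) ≠ some tl) :
    pvBWindowOk preds tl s (PySem.List.pyRange 0 th 1) = false := by
  rw [Bool.eq_false_iff]
  intro hok
  exact h ((pvBWindowOk_iff preds tl s _).mp hok j
    (by rw [PySem.List.mem_pyRange_one]; omega))

-- scanning may skip a failing window start
lemma pvBScan_skip_one (preds : List Int) (tl th a c : Int) (htl : tl ≠ 0)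
    (h : pvBWindowOk preds tl a (PySem.List.pyRange 0 th 1) = false) :
    pvBScan preds tl th (PySem.List.pyRange a c 1)
      = pvBScan preds tl th (PySem.List.pyRange (a + 1) c 1) := by
  by_cases hac : a < c
  · rw [PySem.List.pyRange_one_cons hac]
    simp [pvBScan, htl, h]
  · rw [PySem.List.pyRange_one_eq_nil (by omega), PySem.List.pyRange_one_eq_nil (by omega)]

-- scanning may skip any prefix of failing window starts
lemma pvBScan_skip (preds : List Int) (tl th : Int) (htl : tl ≠ 0) :
    ∀ (d : Nat) (a c : Int),
    (∀ s : Int, a ≤ s → s < a + d → pvBWindowOk preds tl s (PySem.List.pyRange 0 th 1) = false) →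
    pvBScan preds tl th (PySem.List.pyRange a c 1)
      = pvBScan preds tl th (PySem.List.pyRange (a + d) c 1) := by
  intro d
  induction d with
  | zero => intro a c _; norm_num
  | succ d ih =>
    intro a c h
    rw [pvBScan_skip_one preds tl th a c htl (h a (le_refl a) (by omega)),
        ih (a + 1) c (fun s hs hs' => h s (by omega) (by push_cast; omega))]
    congr 2
    push_cast
    ring

-- with true_label = 0 scanning never fires
lemma pvBScan_zero (preds : List Int) (th : Int) :
    ∀ is : List Int, pvBScan preds 0 th is = (0, false, []) := by
  intro is
  induction is with
  | nil => rfl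
  | cons i is ih => simp [pvBScan, ih]

-- with true_label = 0 and 1 ≤ threshold A's loop never fires
lemma pvALoop_zero (preds : List Int) (th : Int) (hth : 1 ≤ th) :
    ∀ (rest : List Int) (i : Int), pvALoop preds 0 th rest i 0 0 = (0, false, []) := by
  intro rest
  induction rest with
  | nil => intro i; rfl
  | cons p rest ih =>
    intro i
    simp only [pvALoop]
    rw [if_neg (fun h => h.2 rfl), if_neg (by omega : ¬ th ≤ (0 : Int))]
    exact ih (i + 1)

-- MAIN LEMMA (true_label ≠ 0, 1 ≤ threshold): A's loop from a consistent mid-run state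
-- (a run of cc matches ends just before position i, no full window starts before i - cc)
-- equals B's scan over the window starts from the current run start i - cc.
lemma pvALoop_eq_scan (preds : List Int) (tl th : Int) (htl : tl ≠ 0) (hth : 1 ≤ th) :
    ∀ (rest : List Int) (i cc : Nat) (onset : Int),
    rest = preds.drop i → cc ≤ i → i ≤ preds.length → (cc : Int) < th →
    (∀ s : Int, (i : Int) - cc ≤ s → s < i → PySem.List.pyGet? preds s = some tl) →
    (1 ≤ cc → onset = (i : Int) - cc) →
    (∀ s : Int, 0 ≤ s → s < (i : Int) - cc →
        pvBWindowOk preds tl s (PySem.List.pyRange 0 th 1) = false) →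
    pvALoop preds tl th rest (i : Int) (cc : Int) onset
      = pvBScan preds tl th
          (PySem.List.pyRange ((i : Int) - cc) ((preds.length : Int) - th + 1) 1) := by
  intro rest
  induction rest with
  | nil =>
    intro i cc onset hrest hci hil hccth _ _ _
    have hlen : preds.length ≤ i := List.drop_eq_nil_iff.mp hrest.symm
    rw [PySem.List.pyRange_one_eq_nil (by omega)]
    rfl
  | cons p rest ih =>
    intro i cc onset hrest hci hil hccth hrun honset hfail
    have hi_lt : i < preds.length := by
      by_contra hge
      rw [List.drop_eq_nil_of_le (by omega)] at hrest
      exact absurd hrest (by simp)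
    have hget : preds[i]? = some p := by
      have h0 : (preds.drop i)[0]? = preds[i]? := by simp [List.getElem?_drop]
      rw [← hrest] at h0
      simpa using h0.symm
    have hgetI : PySem.List.pyGet? preds (i : Int) = some p := by
      rw [PySem.List.pyGet?_natCast]; exact hget
    have hrest' : rest = preds.drop (i + 1) := by
      have h0 : (preds.drop i).tail = preds.drop (i + 1) := List.tail_drop
      rw [← hrest] at h0
      simpa using h0
    simp only [pvALoop]
    by_cases hp : p = tl
    · -- matching position: the run grows
      rw [if_pos (show p = tl ∧ tl ≠ 0 from ⟨hp, htl⟩)]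
      have honset' : (if (cc : Int) + 1 = 1 then (i : Int) else onset) = (i : Int) - cc := by
        by_cases h0 : cc = 0
        · subst h0; simp
        · rw [if_neg (by omega), honset (by omega)]
      rw [honset']
      by_cases hdone : th ≤ (cc : Int) + 1
      · -- run reaches threshold: both sides return window (i - cc)
        have hthcc : (cc : Int) + 1 = th := by omega
        rw [if_pos hdone]
        have hlt : (i : Int) - cc < (preds.length : Int) - th + 1 := by omega
        rw [PySem.List.pyRange_one_cons hlt]
        have hwin : pvBWindowOk preds tl ((i : Int) - cc) (PySem.List.pyRange 0 th 1) = true := by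
          rw [pvBWindowOk_iff]
          intro j hj
          rw [PySem.List.mem_pyRange_one] at hj
          by_cases hj' : (i : Int) - cc + j < i
          · exact hrun _ (by omega) hj'
          · have hji : (i : Int) - cc + j = i := by omega
            rw [hji, hgetI, hp]
        simp [pvBScan, htl, hwin]
      · -- run continues
        rw [if_neg hdone]
        have hA := ih (i + 1) (cc + 1) ((i : Int) - cc) hrest' (by omega) (by omega)
          (by push_cast; omega)
          (fun s hs hs' => by
            push_cast at hs hs'
            by_cases hsi : s < (i : Int)
            · exact hrun s (by omega) hsi
            · have : s = (i : Int) := by omega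
              rw [this, hgetI, hp])
          (fun _ => by push_cast; ring)
          (fun s hs hs' => hfail s hs (by push_cast at hs'; omega))
        push_cast at hA
        have heq : (i : Int) + 1 - ((cc : Int) + 1) = (i : Int) - cc := by ring
        rw [heq] at hA
        exact hA
    · -- non-matching position: the run resets; every window start in [i - cc, i] fails
      rw [if_neg (fun h => hp h.1)]
      rw [if_neg (by omega : ¬ th ≤ (0 : Int))]
      have hfail' : ∀ s : Int, 0 ≤ s → s < (i : Int) + 1 →
          pvBWindowOk preds tl s (PySem.List.pyRange 0 th 1) = false := by
        intro s hs0 hsi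
        by_cases hs : s < (i : Int) - cc
        · exact hfail s hs0 hs
        · exact pvBWindowOk_false preds tl s th ((i : Int) - s) (by omega) (by omega)
            (by rw [show s + ((i : Int) - s) = (i : Int) by ring, hgetI]
                simp [hp])
      have hA := ih (i + 1) 0 0 hrest' (by omega) (by omega) (by omega)
        (fun s hs hs' => by push_cast at hs hs'; omega)
        (fun h => by omega)
        (fun s hs hs' => hfail' s hs (by push_cast at hs' ⊢; omega))
      push_cast at hA
      rw [hA]
      have hskip := pvBScan_skip preds tl th htl (cc + 1) ((i : Int) - cc)
        ((preds.length : Int) - th + 1)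
        (fun s hs hs' => hfail' s (by omega) (by push_cast at hs'; omega))
      push_cast at hskip
      rw [show (i : Int) + 1 - 0 = (i : Int) - cc + ((cc : Int) + 1) by ring]
      exact hskip.symm

-- ===== VERDICT (by name: the statement is the Claim_ definition above) =====
theorem detect_fault_onset_spec : Claim_unchanged_detect_fault_onset := by
  intro preds tl th _ hD
  unfold D_detect_fault_onset at hD
  unfold detect_fault_onset detect_fault_onset_alt
  by_cases hth : 1 ≤ th
  · by_cases htl : tl = 0
    · subst htl
      rw [pvBScan_zero]
      split_ifs with hlen
      · rfl
      · rw [pvALoop_zero preds th hth preds 0]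
    · split_ifs with hlen
      · rw [PySem.List.pyRange_one_eq_nil (by omega)]
        rfl
      · have := pvALoop_eq_scan preds tl th htl hth preds 0 0 0 rfl (by omega) (by omega)
          (by omega) (fun s hs hs' => by omega) (fun h => by omega)
          (fun s hs hs' => by omega)
        simpa using this
  · -- degenerate threshold ≤ 0; ¬D leaves two agreeing cases
    have hth0 : th ≤ 0 := by omega
    have hniff : ¬ (preds = [] ↔ tl ≠ 0) := fun hiff => hD ⟨hth0, hiff⟩
    have hcases : (preds ≠ [] ∧ tl ≠ 0) ∨ (preds = [] ∧ tl = 0) := by tauto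
    rcases hcases with ⟨hne, htl⟩ | ⟨rfl, rfl⟩
    · -- preds ≠ [], tl ≠ 0
      obtain ⟨p, rest, rfl⟩ := List.exists_cons_of_ne_nil hne
      rw [if_neg (by simp; omega)]
      have hcons : (0 : Int) < ((p :: rest).length : Int) - th + 1 := by simp; omega
      rw [PySem.List.pyRange_one_cons hcons]
      have hwin : pvBWindowOk (p :: rest) tl 0 (PySem.List.pyRange 0 th 1) = true := by
        rw [PySem.List.pyRange_one_eq_nil (by omega)]; rfl
      simp only [pvALoop, pvBScan, if_pos htl, hwin]
      by_cases hc : p = tl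
      · rw [if_pos (show p = tl ∧ tl ≠ 0 from ⟨hc, htl⟩), if_pos (by omega : th ≤ (0 : Int) + 1)]
        norm_num
      · rw [if_neg (fun h => hc h.1), if_pos (by omega : th ≤ (0 : Int))]
        rfl
    · -- preds = [], tl = 0
      rw [pvBScan_zero]
      simp only [List.length_nil]
      split_ifs with h
      · rfl
      · rfl

theorem detect_fault_onset_changed : Claim_changed_detect_fault_onset := by
  unfold Claim_changed_detect_fault_onset; decide

theorem detect_fault_onset_tight : Claim_exact_detect_fault_onset := by
  intro preds tl th _ hD heq
  unfold D_detect_fault_onset at hD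
  obtain ⟨hth, hiff⟩ := hD
  unfold detect_fault_onset detect_fault_onset_alt at heq
  by_cases hnil : preds = []
  · -- A returns (0, false, []), B returns (0, true, [])
    subst hnil
    have htl : tl ≠ 0 := hiff.mp rfl
    rw [if_neg (by simp; omega)] at heq
    rw [PySem.List.pyRange_one_cons (by simp; omega)] at heq
    have hwin : pvBWindowOk ([] : List Int) tl 0 (PySem.List.pyRange 0 th 1) = true := by
      rw [PySem.List.pyRange_one_eq_nil (by omega)]; rfl
    simp only [pvBScan, if_pos htl, hwin, pvALoop] at heq
    exact absurd (congrArg (fun t => t.2.1) heq) (by simp)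
  · -- A returns flag true, B returns flag false
    have htl : tl = 0 := of_not_not (fun h => hnil (hiff.mpr h))
    subst htl
    obtain ⟨p, rest, rfl⟩ := List.exists_cons_of_ne_nil hnil
    rw [pvBScan_zero] at heq
    rw [if_neg (by simp; omega)] at heq
    simp only [pvALoop] at heq
    rw [if_neg (fun h => h.2 rfl), if_pos hth] at heq
    exact absurd (congrArg (fun t => t.2.1) heq) (by simp)
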